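-- pv_equiv track=rewrite | github.com/Abhijeet601/caper-club-backend | service.py | _normalize_member_id
-- ===== SOURCE A (Python) =====
-- def _normalize_member_id(value: str | None, fallback: str) -> str:
--   if not value:
--     return fallback
--
--   normalized = ''.join(
--     character if character.isalnum() else '-'
--     for character in value.strip().upper()
--   ).strip('-')
--   normalized = '-'.join(part for part in normalized.split('-') if part)
--
--   return normalized or fallback
-- ===== SOURCE B (Python) =====
-- def _normalize_member_id(value: str | None, fallback: str) -> str:
--   if not value:
--     return fallback
--
--   out = []
--   sep_pending = True
--   for character in value.strip().upper():
--     if character.isalnum():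
--       if sep_pending and out:
--         out.append('-')
--       out.append(character)
--       sep_pending = False
--     else:
--       sep_pending = True
--
--   return ''.join(out) or fallback
-- ===== Notes on version B (the rewrite author's own statement) =====
-- stated objective: simpler
-- what changed: A builds a dash-for-non-alnum string, strips dashes from both ends, then splits on '-', filters empties and re-joins; B is a single character scan with a pending-separator flag that emits each alnum char and at most one '-' between words.
import Mathlib
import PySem

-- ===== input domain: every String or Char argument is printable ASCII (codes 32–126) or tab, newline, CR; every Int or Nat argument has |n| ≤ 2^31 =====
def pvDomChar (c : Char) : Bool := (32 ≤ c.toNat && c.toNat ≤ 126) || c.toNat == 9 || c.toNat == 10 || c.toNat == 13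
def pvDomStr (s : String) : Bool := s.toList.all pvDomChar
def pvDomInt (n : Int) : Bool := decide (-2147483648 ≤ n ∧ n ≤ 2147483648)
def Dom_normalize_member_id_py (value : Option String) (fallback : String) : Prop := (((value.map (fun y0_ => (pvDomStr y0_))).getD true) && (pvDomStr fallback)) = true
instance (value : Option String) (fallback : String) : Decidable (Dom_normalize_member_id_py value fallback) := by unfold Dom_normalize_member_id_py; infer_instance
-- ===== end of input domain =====

-- B replaces A's three passes (map to dashes, strip dashes, split/filter/re-join) by one
-- stateful scan with a pending-separator flag; objective: simpler (same O(n) cost).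

-- ===== PORT A =====
def normalize_member_id_py (value : Option String) (fallback : String) : String :=
  match value with
  | none => fallback
  | some v =>
    if v = "" then fallback
    else
      -- normalized = ''.join(c if c.isalnum() else '-' for c in value.strip().upper()).strip('-')
      let s := PySem.Chars.upper (PySem.Chars.strip v.toList)
      let normalized := PySem.Chars.stripChars
        (s.map (fun c => if PySem.Chars.isalnum c then c else '-')) ['-']
      -- normalized = '-'.join(part for part in normalized.split('-') if part)
      let normalized2 := PySem.Chars.join ['-']
        ((PySem.Chars.splitOn normalized ['-']).filter (fun p => !p.isEmpty))
      -- return normalized or fallback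
      if normalized2.isEmpty then fallback else String.ofList normalized2

-- ===== PORT B =====
def normalize_member_id_py_alt (value : Option String) (fallback : String) : String :=
  match value with
  | none => fallback
  | some v =>
    if v = "" then fallback
    else
      let st := (PySem.Chars.upper (PySem.Chars.strip v.toList)).foldl
        (fun st c =>
          if PySem.Chars.isalnum c then
            ((if st.2 && !st.1.isEmpty then st.1 ++ ['-'] else st.1) ++ [c], false)
          else (st.1, true))
        (([] : List Char), true)
      if st.1.isEmpty then fallback else String.ofList st.1

-- ===== PRECONDITION & SPEC =====
def Spec_normalize_member_id_py (value : Option String) (fallback : String) (out : String) : Prop := out = normalize_member_id_py_alt value fallback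
instance (value : Option String) (fallback : String) (out : String) : Decidable (Spec_normalize_member_id_py value fallback out) := by unfold Spec_normalize_member_id_py; infer_instance

-- ===== CLAIM (what is proved, stated in full; the proofs are below) =====
def Claim_equal_normalize_member_id_py : Prop := ∀ (value : Option String) (fallback : String), Dom_normalize_member_id_py value fallback → Spec_normalize_member_id_py value fallback (normalize_member_id_py value fallback)

-- ===== LEMMAS AND PROOFS =====

-- structural version of str.split('-') on a single-char separator
def splitDash : List Char → List (List Char)
  | [] => [[]]
  | c :: t => if c = '-' then [] :: splitDash t else (splitDash t).modifyHead (c :: ·)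

-- one-pass normalizer: pvG b s, where b says whether we are inside a word
def pvG : Bool → List Char → List Char
  | _, [] => []
  | false, c :: t => if PySem.Chars.isalnum c then c :: pvG true t else pvG false t
  | true, c :: t => if PySem.Chars.isalnum c then c :: pvG true t
      else if (pvG false t).isEmpty then [] else '-' :: pvG false t

def pvJ (z : List Char) : List Char :=
  PySem.Chars.join ['-'] ((splitDash z).filter (fun p => !p.isEmpty))

lemma splitDash_ne_nil (z : List Char) : splitDash z ≠ [] := by
  cases z with
  | nil => simp [splitDash]
  | cons c t =>
    simp only [splitDash]
    split_ifs
    · simp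
    · cases h : splitDash t with
      | nil => exact absurd h (splitDash_ne_nil t)
      | cons a l => simp [List.modifyHead]

lemma join_cons (x : List Char) (ys : List (List Char)) :
    PySem.Chars.join ['-'] (x :: ys) =
      x ++ (if ys = [] then [] else '-' :: PySem.Chars.join ['-'] ys) := by
  cases ys with
  | nil => simp [PySem.Chars.join, List.intercalate]
  | cons y l => simp [PySem.Chars.join, List.intercalate, List.intersperse]

lemma go_eq (l : List Char) : ∀ (fuel : ℕ) (cur : List Char) (acc : List (List Char)),
    l.length < fuel →
    PySem.Chars.splitOn.go ['-'] fuel l cur acc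
      = acc.reverse ++ (splitDash l).modifyHead (cur.reverse ++ ·) := by
  induction l with
  | nil =>
    intro fuel cur acc h
    cases fuel with
    | zero => omega
    | succ n => simp [PySem.Chars.splitOn.go, splitDash]
  | cons c t ih =>
    intro fuel cur acc h
    cases fuel with
    | zero => simp at h
    | succ n =>
      rw [PySem.Chars.splitOn.go]
      by_cases hc : c = '-'
      · subst hc
        have hp : List.isPrefixOf ['-'] ('-' :: t) = true := by simp [List.isPrefixOf]
        rw [if_pos hp]
        have hd : List.drop (['-'].length) ('-' :: t) = t := by simp
        rw [hd, ih n [] (List.reverse cur :: acc) (by simp at h; omega)]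
        simp only [splitDash]
        cases splitDash t <;> simp
      · have hp : List.isPrefixOf ['-'] (c :: t) = false := by
          simp [List.isPrefixOf]
          exact fun h => hc h.symm
        simp only [hp, Bool.false_eq_true, if_false, if_neg hc, splitDash]
        rw [ih n (c :: cur) acc (by simpa using Nat.lt_of_succ_lt_succ h)]
        cases hsd : splitDash t with
        | nil => exact absurd hsd (splitDash_ne_nil t)
        | cons a l => simp [List.modifyHead]

lemma splitOn_eq (z : List Char) : PySem.Chars.splitOn z ['-'] = splitDash z := by
  unfold PySem.Chars.splitOn
  rw [go_eq z (z.length + 1) [] [] (by omega)]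
  cases hsd : splitDash z with
  | nil => exact absurd hsd (splitDash_ne_nil z)
  | cons a l => simp [List.modifyHead]

lemma pvJ_cons_dash (t : List Char) : pvJ ('-' :: t) = pvJ t := by
  simp [pvJ, splitDash]

lemma pvJ_dropWhile (z : List Char) :
    pvJ (z.dropWhile (fun c => List.contains ['-'] c)) = pvJ z := by
  induction z with
  | nil => rfl
  | cons c t ih =>
    by_cases hc : c = '-'
    · subst hc
      rw [List.dropWhile_cons_of_pos (by simp), ih, pvJ_cons_dash]
    · rw [List.dropWhile_cons_of_neg (by simp [hc])]

lemma splitDash_append_dash (y : List Char) :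
    splitDash (y ++ ['-']) = splitDash y ++ [[]] := by
  induction y with
  | nil => simp [splitDash]
  | cons c t ih =>
    by_cases hc : c = '-'
    · subst hc; simp [splitDash, ih]
    · simp only [List.cons_append, splitDash, if_neg hc, ih]
      cases hsd : splitDash t with
      | nil => exact absurd hsd (splitDash_ne_nil t)
      | cons a l => simp [List.modifyHead]

lemma pvJ_append_dash (y : List Char) : pvJ (y ++ ['-']) = pvJ y := by
  simp [pvJ, splitDash_append_dash]

lemma pvJ_append_all_dash : ∀ (w : List Char), (∀ c ∈ w, c = '-') →
    ∀ y : List Char, pvJ (y ++ w) = pvJ y := by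
  intro w
  induction w with
  | nil => intro _ y; simp
  | cons c t ih =>
    intro h y
    have hc : c = '-' := h c (by simp)
    subst hc
    have : y ++ '-' :: t = (y ++ ['-']) ++ t := by simp
    rw [this, ih (fun c hc => h c (by simp [hc])) (y ++ ['-']), pvJ_append_dash]

lemma pvJ_stripChars (z : List Char) : pvJ (PySem.Chars.stripChars z ['-']) = pvJ z := by
  unfold PySem.Chars.stripChars
  have hy : (List.dropWhile (fun c => List.contains ['-'] c)
      (List.dropWhile (fun c => List.contains ['-'] c) z).reverse).reverse
      = List.rdropWhile (fun c => List.contains ['-'] c)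
          (List.dropWhile (fun c => List.contains ['-'] c) z) := rfl
  rw [hy]
  set p := fun c => List.contains ['-'] c with hp
  set y := List.dropWhile p z with hyy
  have hsplit : List.rdropWhile p y ++ List.rtakeWhile p y = y :=
    List.rdropWhile_append_rtakeWhile
  have hall : ∀ c ∈ List.rtakeWhile p y, c = '-' := by
    intro c hc
    have := List.mem_rtakeWhile_imp hc
    simpa [hp] using this
  calc pvJ (List.rdropWhile p y)
      = pvJ (List.rdropWhile p y ++ List.rtakeWhile p y) :=
        (pvJ_append_all_dash _ hall _).symm
    _ = pvJ y := by rw [hsplit]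
    _ = pvJ z := by rw [hyy]; exact pvJ_dropWhile z

lemma pvJ_eq_nil_iff (z : List Char) :
    pvJ z = [] ↔ (splitDash z).filter (fun p => !p.isEmpty) = [] := by
  constructor
  · intro h
    cases hf : (splitDash z).filter (fun p => !p.isEmpty) with
    | nil => rfl
    | cons a l =>
      have ha : a ≠ [] := by
        have : a ∈ (splitDash z).filter (fun p => !p.isEmpty) := by simp [hf]
        simpa using (List.of_mem_filter this)
      rw [pvJ, hf, join_cons] at h
      cases a with
      | nil => exact absurd rfl ha
      | cons x xs => simp at h
  · intro h; simp [pvJ, h, PySem.Chars.join, List.intercalate]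

-- mid-word variant of pvJ
def pvM (s : List Char) : List Char :=
  let ps := splitDash (s.map (fun c => if PySem.Chars.isalnum c then c else '-'))
  let r := ps.tail.filter (fun p => !p.isEmpty)
  ps.headI ++ (if r = [] then [] else '-' :: PySem.Chars.join ['-'] r)

lemma pvAG (s : List Char) :
    pvJ (s.map (fun c => if PySem.Chars.isalnum c then c else '-')) = pvG false s
    ∧ pvM s = pvG true s := by
  induction s with
  | nil => constructor <;> simp [pvJ, pvM, splitDash, pvG, PySem.Chars.join, List.intercalate]
  | cons c t ih =>
    obtain ⟨ih1, ih2⟩ := ih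
    by_cases hc : PySem.Chars.isalnum c = true
    · -- c maps to itself, c ≠ '-' since '-' is not alnum
      have hcd : c ≠ '-' := by
        intro h; subst h; simp [PySem.Chars.isalnum, PySem.Chars.isalpha,
          PySem.Chars.isdigit, PySem.Chars.isupper, PySem.Chars.islower] at hc
      have hmap : (c :: t).map (fun c => if PySem.Chars.isalnum c then c else '-')
          = c :: t.map (fun c => if PySem.Chars.isalnum c then c else '-') := by simp [hc]
      cases hsd : splitDash (t.map (fun c => if PySem.Chars.isalnum c then c else '-')) with
      | nil => exact absurd hsd (splitDash_ne_nil _)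
      | cons p0 rest =>
        have hsplit : splitDash ((c :: t).map (fun c => if PySem.Chars.isalnum c then c else '-'))
            = (c :: p0) :: rest := by
          rw [hmap, splitDash, if_neg hcd, hsd]; rfl
        constructor
        · rw [pvJ, hsplit]
          have : ((c :: p0) :: rest).filter (fun p => !p.isEmpty)
              = (c :: p0) :: rest.filter (fun p => !p.isEmpty) := by simp
          rw [this, join_cons, pvG, if_pos hc, ← ih2]
          simp [pvM, hsd]
        · rw [pvM, hsplit]
          simp only [List.headI, List.tail]
          rw [pvG, if_pos hc, ← ih2]
          simp [pvM, hsd]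
    · -- c maps to '-'
      have hmap : (c :: t).map (fun c => if PySem.Chars.isalnum c then c else '-')
          = '-' :: t.map (fun c => if PySem.Chars.isalnum c then c else '-') := by simp [hc]
      have hsplit : splitDash ((c :: t).map (fun c => if PySem.Chars.isalnum c then c else '-'))
          = [] :: splitDash (t.map (fun c => if PySem.Chars.isalnum c then c else '-')) := by
        rw [hmap, splitDash, if_pos rfl]
      constructor
      · rw [pvJ, hsplit]
        have : ([] :: splitDash (t.map (fun c => if PySem.Chars.isalnum c then c else '-'))).filter
            (fun p => !p.isEmpty)
            = (splitDash (t.map (fun c => if PySem.Chars.isalnum c then c else '-'))).filter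
              (fun p => !p.isEmpty) := by simp
        rw [this, ← pvJ, ih1, pvG, if_neg hc]
      · rw [pvM, hsplit]
        simp only [List.headI, List.tail, List.nil_append]
        rw [pvG, if_neg hc]
        by_cases hnil : pvG false t = []
        · have : (splitDash (t.map (fun c => if PySem.Chars.isalnum c then c else '-'))).filter
              (fun p => !p.isEmpty) = [] := (pvJ_eq_nil_iff _).mp (by rw [ih1]; exact hnil)
          simp [this, hnil]
        · have hne : (splitDash (t.map (fun c => if PySem.Chars.isalnum c then c else '-'))).filter
              (fun p => !p.isEmpty) ≠ [] := by
            intro h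
            exact hnil (by rw [← ih1]; exact (pvJ_eq_nil_iff _).mpr h)
          have hE : (pvG false t).isEmpty = false := by
            cases h : pvG false t
            · exact absurd h hnil
            · rfl
          rw [hE]
          simp only [Bool.false_eq_true, if_false]
          rw [if_neg hne, ← ih1]
          simp [pvJ]

def pvStep (st : List Char × Bool) (c : Char) : List Char × Bool :=
  if PySem.Chars.isalnum c then
    ((if st.2 && !st.1.isEmpty then st.1 ++ ['-'] else st.1) ++ [c], false)
  else (st.1, true)

lemma pvB (s : List Char) :
    (∀ acc : List Char,
      (s.foldl pvStep (acc, true)).1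
        = acc ++ (if acc = [] ∨ pvG false s = [] then pvG false s else '-' :: pvG false s))
    ∧ (∀ acc : List Char, acc ≠ [] →
      (s.foldl pvStep (acc, false)).1 = acc ++ pvG true s) := by
  induction s with
  | nil =>
    constructor
    · intro acc; simp [pvG]
    · intro acc _; simp [pvG]
  | cons c t ih =>
    obtain ⟨ihT, ihF⟩ := ih
    by_cases hc : PySem.Chars.isalnum c = true
    · constructor
      · intro acc
        rw [List.foldl_cons]
        have hstep : pvStep (acc, true) c
            = ((if !acc.isEmpty then acc ++ ['-'] else acc) ++ [c], false) := by
          simp [pvStep, hc]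
        rw [hstep]
        rw [ihF _ (by cases acc <;> simp)]
        rw [pvG, if_pos hc]
        by_cases hacc : acc = []
        · subst hacc; simp
        · have : (!acc.isEmpty) = true := by
            cases acc with
            | nil => exact absurd rfl hacc
            | cons x xs => rfl
          simp [this, hacc]
      · intro acc hacc
        rw [List.foldl_cons]
        have hstep : pvStep (acc, false) c = (acc ++ [c], false) := by
          simp [pvStep, hc]
        rw [hstep, ihF _ (by simp), pvG, if_pos hc]
        simp
    · constructor
      · intro acc
        rw [List.foldl_cons]
        have hstep : pvStep (acc, true) c = (acc, true) := by simp [pvStep, hc]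
        rw [hstep, ihT, pvG, if_neg hc]
      · intro acc hacc
        rw [List.foldl_cons]
        have hstep : pvStep (acc, false) c = (acc, true) := by simp [pvStep, hc]
        rw [hstep, ihT, pvG]
        by_cases hnil : pvG false t = []
        · simp [hnil, hc]
        · simp [hnil, hc, hacc]

lemma core (s : List Char) :
    PySem.Chars.join ['-']
      ((PySem.Chars.splitOn
        (PySem.Chars.stripChars (s.map (fun c => if PySem.Chars.isalnum c then c else '-')) ['-'])
        ['-']).filter (fun p => !p.isEmpty))
    = (s.foldl pvStep ([], true)).1 := by
  rw [splitOn_eq, ← pvJ, pvJ_stripChars, (pvAG s).1, (pvB s).1 []]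
  simp

-- ===== VERDICT (by name: the statement is the Claim_ definition above) =====
theorem normalize_member_id_py_spec : Claim_equal_normalize_member_id_py := by
  intro value fallback _
  unfold Spec_normalize_member_id_py normalize_member_id_py normalize_member_id_py_alt
  cases value with
  | none => rfl
  | some v =>
    by_cases hv : v = ""
    · simp [hv]
    · simp only [if_neg hv]
      have := core (PySem.Chars.upper (PySem.Chars.strip v.toList))
      have hfold : ((PySem.Chars.upper (PySem.Chars.strip v.toList)).foldl
          (fun st c =>
            if PySem.Chars.isalnum c then
              ((if st.2 && !st.1.isEmpty then st.1 ++ ['-'] else st.1) ++ [c], false)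
            else (st.1, true)) (([] : List Char), true))
          = ((PySem.Chars.upper (PySem.Chars.strip v.toList)).foldl pvStep ([], true)) := by
        rfl
      rw [hfold, ← this]
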